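-- pv_equiv track=rewrite | github.com/Kosaaaaa/advent-of-code | aoc2023/day11/part1.py | parse_galaxies
-- ===== SOURCE A (Python) =====
-- EXPANSION = 2
--
-- def parse_galaxies(s: str) -> list[tuple[int, int]]:
--     lines = s.splitlines()
--
--     empty_columns = [
--         all(line[i] == '.' for line in lines)
--         for i in range(len(lines[0]))
--     ]
--     galaxies = []
--     x, y = 0, 0
--
--     for line in lines:
--         x = 0
--         y += EXPANSION if set(line) == {'.'} else 1
--         for i, element in enumerate(line):
--             x += EXPANSION if empty_columns[i] else 1
--             if element == '#':
--                 galaxies.append((x, y))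
--
--     return galaxies
-- ===== SOURCE B (Python) =====
-- EXPANSION = 2
--
--
-- def parse_galaxies(s: str) -> list[tuple[int, int]]:
--     lines = s.splitlines()
--
--     # ranks of the empty rows / columns; a galaxy at raw (row r, col i) lands at
--     # (i+1, r+1) shifted right/down by (EXPANSION-1) per empty column/row before it
--     empty_rows = [r for r, line in enumerate(lines)
--                   if all(c == '.' for c in line)]
--     empty_cols = [i for i, col in enumerate(zip(*lines))
--                   if all(c == '.' for c in col)]
--     shift = EXPANSION - 1
--
--     return [(i + 1 + shift * sum(1 for j in empty_cols if j <= i),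
--              r + 1 + shift * sum(1 for j in empty_rows if j <= r))
--             for r, line in enumerate(lines)
--             for i, c in enumerate(line)
--             if c == '#']
-- ===== Notes on version B (the rewrite author's own statement) =====
-- stated objective: alternative
-- what changed: A sweeps the grid threading running x/y weight accumulators and appends inside nested loops; B first lists the ranks of the empty rows and of the empty columns of the transposed grid (zip), then computes each galaxy's coordinate independently as raw index+1 plus (EXPANSION-1) times the number of empty rows/columns at or before it.
-- outside the precondition, e.g. on parse_galaxies('#\n\n#'): A returns [(1, 1), (1, 3)], B returns [(1, 1), (1, 4)]; on parse_galaxies(''): A raises IndexError, B returns []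
import Mathlib
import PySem

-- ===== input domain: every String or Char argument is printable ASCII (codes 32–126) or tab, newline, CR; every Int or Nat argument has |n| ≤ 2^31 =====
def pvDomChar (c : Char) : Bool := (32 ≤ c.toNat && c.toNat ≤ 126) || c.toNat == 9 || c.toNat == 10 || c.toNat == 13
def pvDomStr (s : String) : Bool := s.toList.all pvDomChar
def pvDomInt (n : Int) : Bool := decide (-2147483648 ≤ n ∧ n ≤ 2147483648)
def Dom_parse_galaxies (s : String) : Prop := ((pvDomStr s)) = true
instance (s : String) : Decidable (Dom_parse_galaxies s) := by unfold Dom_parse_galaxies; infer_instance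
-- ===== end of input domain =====

-- B drops A's running x/y weight accumulators: it lists the ranks of the empty
-- rows and of the empty columns of the transposed grid, then computes each
-- galaxy's coordinate independently as raw index+1 plus the number of empty
-- rows/columns at or before it (alternative algorithm, similar cost).

-- ===== PORT A =====
-- all(line[i] == '.' for line in lines)
def pvEmptyCol (lines : List String) (i : Nat) : Bool :=
  lines.all (fun line => PySem.Str.pyGet? line (i : Int) == some '.')

-- set(line) == {'.'}
def pvAllDotSet (line : String) : Bool :=
  PySem.Set.equal (PySem.Set.ofList line.toList) (PySem.Set.ofList ['.'])

def parse_galaxies (s : String) : List (Int × Int) :=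
  let lines := PySem.Str.splitlines s
  -- lines[0] raises IndexError on empty input: excluded by Pre_, headD is a dummy
  let empty_columns : List Bool :=
    (List.range ((lines.headD "").toList.length)).map (fun i => pvEmptyCol lines i)
  (lines.foldl
    (fun (st : List (Int × Int) × Int) (line : String) =>
      let y := st.2 + (if pvAllDotSet line then 2 else 1)
      (((PySem.List.enumerate line.toList 0).foldl
          (fun (st2 : List (Int × Int) × Int) (p : Int × Char) =>
            -- empty_columns[i] raises when the line is longer than lines[0]: excluded by Pre_
            let x := st2.2 + (if empty_columns.getD p.1.toNat false then 2 else 1)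
            ((if p.2 == '#' then st2.1 ++ [(x, y)] else st2.1), x))
          (st.1, 0)).1, y))
    ([], 0)).1

-- ===== PORT B =====
-- all(c == '.' for c in cs)
def pvAllDot (cs : List Char) : Bool := cs.all (fun c => c == '.')

-- zip(*lines): fuel = length of the first list (bounds the number of produced tuples)
def pvZipGo : Nat → List (List Char) → List (List Char)
  | 0, _ => []
  | n + 1, css =>
      if css.any List.isEmpty then []
      else css.map (fun c => c.headD ' ') :: pvZipGo n (css.map List.tail)

def pvZipCols (css : List (List Char)) : List (List Char) :=
  match css with
  | [] => []
  | c :: _ => pvZipGo c.length css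

def parse_galaxies_alt (s : String) : List (Int × Int) :=
  let lines := PySem.Str.splitlines s
  let empty_rows : List Nat :=
    ((PySem.List.enumerate lines 0).filter (fun p => pvAllDot p.2.toList)).map
      (fun p => p.1.toNat)
  let empty_cols : List Nat :=
    ((PySem.List.enumerate (pvZipCols (lines.map String.toList)) 0).filter
        (fun p => pvAllDot p.2)).map (fun p => p.1.toNat)
  let shift : Int := 2 - 1
  (PySem.List.enumerate lines 0).flatMap (fun rl =>
    ((PySem.List.enumerate rl.2.toList 0).filter (fun p => p.2 == '#')).map
      (fun p =>
        ((p.1.toNat : Int) + 1 +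
           shift * ((empty_cols.filter (fun j => j ≤ p.1.toNat)).length : Int),
         (rl.1.toNat : Int) + 1 +
           shift * ((empty_rows.filter (fun j => j ≤ rl.1.toNat)).length : Int))))

-- ===== PRECONDITION & SPEC =====
-- Pre_ excludes the inputs on which A raises IndexError — the empty input
-- (s.splitlines() == [], so lines[0] raises) and ragged input where some line's
-- length differs from the first line's (line[i] or empty_columns[i] raises) —
-- plus the few ragged inputs where all()'s short-circuit happens to dodge the
-- IndexError: there A's value is an accident of short-circuit evaluation order.
def Pre_parse_galaxies (s : String) : Prop :=
  PySem.Str.splitlines s ≠ [] ∧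
  ∀ l ∈ PySem.Str.splitlines s,
    l.toList.length = ((PySem.Str.splitlines s).headD "").toList.length
instance (s : String) : Decidable (Pre_parse_galaxies s) := by
  unfold Pre_parse_galaxies; infer_instance

def pvWitness_parse_galaxies : String := "#.\n.."

def Spec_parse_galaxies (s : String) (out : List (Int × Int)) : Prop := out = parse_galaxies_alt s
instance (s : String) (out : List (Int × Int)) : Decidable (Spec_parse_galaxies s out) := by unfold Spec_parse_galaxies; infer_instance

-- ===== CLAIM (what is proved, stated in full; the proofs are below) =====
def Claim_equal_parse_galaxies : Prop := ∀ (s : String), Dom_parse_galaxies s → Pre_parse_galaxies s → Spec_parse_galaxies s (parse_galaxies s)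

-- ===== LEMMAS AND PROOFS =====

-- running total of the weights wt over a list
def pvEnd {α : Type} (wt : α → Int) : List α → Int → Int
  | [], a0 => a0
  | l :: ls, a0 => pvEnd wt ls (a0 + wt l)

-- cumulative column coordinate: sum of the first n column weights
def pvCsum (g : Nat → Int) (n : Nat) : Int := pvEnd g (List.range n) 0

-- the common normal form of both programs: galaxies row by row, with running y
def pvFlat (g : Nat → Int) (wt : String → Int) : List String → Int → List (Int × Int)
  | [], _ => []
  | l :: ls, y0 =>
      ((PySem.List.enumerate l.toList 0).filter (fun p => p.2 == '#')).map
        (fun p => (pvCsum g (p.1.toNat + 1), y0 + wt l))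
      ++ pvFlat g wt ls (y0 + wt l)

theorem pvEnd_append {α : Type} (wt : α → Int) (xs ys : List α) :
    ∀ a0, pvEnd wt (xs ++ ys) a0 = pvEnd wt ys (pvEnd wt xs a0) := by
  induction xs with
  | nil => intro a0; rfl
  | cons x xs ih => intro a0; simp [pvEnd, ih]

theorem pvCsum_succ (g : Nat → Int) (n : Nat) :
    pvCsum g (n + 1) = pvCsum g n + g n := by
  simp [pvCsum, List.range_succ, pvEnd_append, pvEnd]

-- the if-2-else-1 total is length plus the number of hits
theorem pvEnd_if {α : Type} (q : α → Bool) :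
    ∀ (l : List α) (a0 : Int),
      pvEnd (fun x => if q x then 2 else 1) l a0
        = a0 + (l.length : Int) + (l.countP q : Int) := by
  intro l
  induction l with
  | nil => intro a0; simp [pvEnd]
  | cons x ls ih =>
      intro a0
      rw [pvEnd, ih]
      by_cases hx : q x = true <;> simp [hx] <;> omega

theorem pvInner_eq (g : Nat → Int) (y : Int) :
    ∀ (cs : List Char) (k : Nat) (acc : List (Int × Int)),
      ((PySem.List.enumerate cs (k : Int)).foldl
        (fun (st2 : List (Int × Int) × Int) (p : Int × Char) =>
          let x := st2.2 + g p.1.toNat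
          ((if p.2 == '#' then st2.1 ++ [(x, y)] else st2.1), x))
        (acc, pvCsum g k)).1
      = acc ++ ((PySem.List.enumerate cs (k : Int)).filter (fun p => p.2 == '#')).map
          (fun p => (pvCsum g (p.1.toNat + 1), y)) := by
  intro cs
  induction cs with
  | nil => intro k acc; simp [PySem.List.enumerate_nil]
  | cons c cs ih =>
      intro k acc
      rw [PySem.List.enumerate_cons]
      have hk : (k : Int) + 1 = ((k + 1 : Nat) : Int) := by omega
      have hx : pvCsum g k + g ((k : Int).toNat) = pvCsum g (k + 1) := by
        simp [pvCsum_succ]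
      by_cases hc : (c == '#') = true
      · simp only [List.foldl_cons, List.filter_cons, hc, if_pos, List.map_cons, hx, hk]
        rw [ih (k + 1) (acc ++ [(pvCsum g (k + 1), y)])]
        simp
      · simp only [List.foldl_cons, List.filter_cons, hc, hx, hk,
          Bool.false_eq_true, if_false]
        rw [ih (k + 1) acc]

theorem pvOuter_eq (g : Nat → Int) (wt : String → Int) :
    ∀ (ls : List String) (acc : List (Int × Int)) (y0 : Int),
      (ls.foldl
        (fun (st : List (Int × Int) × Int) (line : String) =>
          let y := st.2 + wt line
          (((PySem.List.enumerate line.toList 0).foldl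
              (fun (st2 : List (Int × Int) × Int) (p : Int × Char) =>
                let x := st2.2 + g p.1.toNat
                ((if p.2 == '#' then st2.1 ++ [(x, y)] else st2.1), x))
              (st.1, 0)).1, y))
        (acc, y0)).1
      = acc ++ pvFlat g wt ls y0 := by
  intro ls
  induction ls with
  | nil => intro acc y0; simp [pvFlat]
  | cons l ls ih =>
      intro acc y0
      simp only [List.foldl_cons]
      rw [show ((PySem.List.enumerate l.toList 0).foldl
            (fun (st2 : List (Int × Int) × Int) (p : Int × Char) =>
              let x := st2.2 + g p.1.toNat
              ((if p.2 == '#' then st2.1 ++ [(x, y0 + wt l)] else st2.1), x))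
            (acc, 0)).1
          = acc ++ ((PySem.List.enumerate l.toList 0).filter (fun p => p.2 == '#')).map
              (fun p => (pvCsum g (p.1.toNat + 1), y0 + wt l)) from by
            have := pvInner_eq g (y0 + wt l) l.toList 0 acc
            simpa using this]
      rw [ih]
      simp [pvFlat]

theorem pvB_eq (g : Nat → Int) (wt : String → Int) (X Y : Nat → Int) :
    ∀ (ls : List String) (r : Nat) (y0 : Int),
      (∀ j, j < ls.length → Y (r + j) = pvEnd wt (ls.take (j + 1)) y0) →
      (∀ l ∈ ls, ∀ i, i < l.toList.length → X i = pvCsum g (i + 1)) →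
      (PySem.List.enumerate ls (r : Int)).flatMap (fun rl =>
        ((PySem.List.enumerate rl.2.toList 0).filter (fun p => p.2 == '#')).map
          (fun p => (X p.1.toNat, Y rl.1.toNat)))
      = pvFlat g wt ls y0 := by
  intro ls
  induction ls with
  | nil => intro r y0 _ _; simp [PySem.List.enumerate_nil, pvFlat]
  | cons l ls ih =>
      intro r y0 hY hX
      rw [PySem.List.enumerate_cons]
      simp only [List.flatMap_cons]
      have hYr : Y ((r : Int).toNat) = y0 + wt l := by
        have := hY 0 (by simp)
        simpa [pvEnd] using this
      have hhead :
          ((PySem.List.enumerate l.toList 0).filter (fun p => p.2 == '#')).map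
            (fun p => (X p.1.toNat, Y ((r : Int)).toNat))
          = ((PySem.List.enumerate l.toList 0).filter (fun p => p.2 == '#')).map
            (fun p => (pvCsum g (p.1.toNat + 1), y0 + wt l)) := by
        apply List.map_congr_left
        intro p hp
        have hp' : p ∈ PySem.List.enumerate l.toList 0 := List.mem_of_mem_filter hp
        rw [PySem.List.mem_enumerate_iff] at hp'
        obtain ⟨i, hi, rfl⟩ := hp'
        have : X ((0 + (i : Int)).toNat) = pvCsum g (((0 + (i : Int)).toNat) + 1) :=
          hX l (by simp) _ (by simpa using hi)
        rw [this, hYr]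
      have hk : (r : Int) + 1 = ((r + 1 : Nat) : Int) := by omega
      rw [hhead, hk, ih (r + 1) (y0 + wt l)
        (fun j hj => by
          have := hY (j + 1) (by simpa using Nat.succ_lt_succ hj)
          simpa [pvEnd, Nat.add_comm, Nat.add_assoc, Nat.add_left_comm] using this)
        (fun l' hl' i hi => hX l' (List.mem_cons_of_mem _ hl') i hi)]
      simp [pvFlat]

-- B-side lemmas -------------------------------------------------------------

-- counting collected indices ≤ k+i counts the hits among the first i+1 elements
theorem pvIdx_count {α : Type} (q : α → Bool) :
    ∀ (xs : List α) (k i : Nat),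
      ((((PySem.List.enumerate xs (k : Int)).filter (fun p => q p.2)).map
          (fun p => p.1.toNat)).filter (fun j => j ≤ k + i)).length
        = (xs.take (i + 1)).countP q := by
  intro xs
  induction xs with
  | nil => intro k i; simp [PySem.List.enumerate_nil]
  | cons x xs ih =>
      intro k i
      rw [PySem.List.enumerate_cons]
      have hk : (k : Int) + 1 = ((k + 1 : Nat) : Int) := by omega
      rw [hk]
      cases i with
      | zero =>
          by_cases hx : q x = true <;> simp [hx] <;>
          · intro a z c hmem hq hnat
            rw [PySem.List.mem_enumerate_iff] at hmem
            obtain ⟨m, hm, heq⟩ := hmem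
            have hz : z = ((k : Int) + 1) + (m : Int) := congrArg Prod.fst heq
            omega
      | succ i' =>
          have harith : k + (i' + 1) = k + 1 + i' := by omega
          have hih := ih (k + 1) i'
          simp only [Nat.cast_add, Nat.cast_one] at hih
          by_cases hx : q x = true
          · simp only [List.filter_cons, List.map_cons, hx, if_true]
            simp [harith]
            rw [if_pos (by omega), List.length_cons, hih]
            simp [hx]
          · simp [hx, harith, hih]

-- the zip of equal-length lists, written by columns
theorem pvZipGo_eq : ∀ (n : Nat) (css : List (List Char)),
    (∀ c ∈ css, n ≤ c.length) →
    pvZipGo n css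
      = (List.range n).map (fun j => css.map (fun c => (c.drop j).headD ' ')) := by
  intro n
  induction n with
  | zero => intro css _; simp [pvZipGo]
  | succ n ih =>
      intro css h
      have hne : css.any List.isEmpty = false := by
        rw [List.any_eq_false]
        intro c hc
        have := h c hc
        cases c with
        | nil => simp at this
        | cons a as => simp
      rw [pvZipGo, hne]
      simp only [Bool.false_eq_true, if_false]
      rw [List.range_succ_eq_map, List.map_cons,
        ih (css.map List.tail) (by
          intro c hc
          obtain ⟨c', hc', rfl⟩ := List.mem_map.mp hc
          have := h c' hc'
          rw [List.length_tail]
          omega)]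
      congr 1
      · simp

-- set(line) == {'.'} coincides with all(c == '.') on nonempty lines
theorem pvAllDotSet_eq (line : String) (h : line.toList ≠ []) :
    pvAllDotSet line = pvAllDot line.toList := by
  unfold pvAllDotSet pvAllDot
  rw [Bool.eq_iff_iff]
  constructor
  · intro heq
    rw [List.all_eq_true]
    intro c hc
    have h1 : PySem.Set.issubset (PySem.Set.ofList line.toList)
        (PySem.Set.ofList ['.']) = true := by
      have := heq
      unfold PySem.Set.equal at this
      exact (Bool.and_eq_true_iff.mp this).1
    unfold PySem.Set.issubset at h1
    rw [List.all_eq_true] at h1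
    have hc' : c ∈ PySem.Set.ofList line.toList := (PySem.Set.mem_ofList _ _).mpr hc
    have := h1 c hc'
    have hmem : c ∈ PySem.Set.ofList ['.'] := by
      simpa [PySem.Set.contains] using this
    rw [PySem.Set.mem_ofList] at hmem
    simpa using hmem
  · intro hall
    rw [List.all_eq_true] at hall
    have hlist : PySem.Set.ofList line.toList = ['.'] := by
      cases hcs : line.toList with
      | nil => exact absurd hcs h
      | cons c cs =>
          have hc : c = '.' := by
            have := hall c (by rw [hcs]; exact List.mem_cons_self)
            simpa using this
          subst hc
          rw [show (PySem.Set.ofList ('.' :: cs) : List Char)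
              = cs.foldl PySem.Set.add ['.'] from by
            simp [PySem.Set.ofList, PySem.Set.empty, PySem.Set.add,
              PySem.Set.contains, List.foldl_cons]]
          have : ∀ ds : List Char, (∀ d ∈ ds, d = '.') →
              ds.foldl PySem.Set.add ['.'] = ['.'] := by
            intro ds
            induction ds with
            | nil => intro _; rfl
            | cons d ds ihd =>
                intro hd
                have : d = '.' := hd d List.mem_cons_self
                subst this
                rw [List.foldl_cons, show PySem.Set.add ['.'] '.' = ['.'] from by
                  simp [PySem.Set.add, PySem.Set.contains]]
                exact ihd (fun e he => hd e (List.mem_cons_of_mem _ he))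
          exact this cs (fun d hd => by
            have := hall d (by rw [hcs]; exact List.mem_cons_of_mem _ hd)
            simpa using this)
    rw [hlist]
    simp [PySem.Set.equal, PySem.Set.issubset, PySem.Set.contains, PySem.Set.ofList,
      PySem.Set.empty, PySem.Set.add]

-- both programs return [] on a zero-width grid (all lines empty)
theorem pvFlat_empty (g : Nat → Int) (wt : String → Int) :
    ∀ (ls : List String) (y0 : Int), (∀ l ∈ ls, l.toList = []) →
      pvFlat g wt ls y0 = [] := by
  intro ls
  induction ls with
  | nil => intro y0 _; rfl
  | cons l ls ih =>
      intro y0 h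
      rw [pvFlat, h l List.mem_cons_self]
      simp [PySem.List.enumerate_nil, ih (y0 + wt l)
        (fun l' hl' => h l' (List.mem_cons_of_mem _ hl'))]

theorem pvFlatMap_empty {β : Type} (F : (Int × String) → (Int × Char) → β) :
    ∀ (ls : List String) (r : Int), (∀ l ∈ ls, l.toList = []) →
      (PySem.List.enumerate ls r).flatMap (fun rl =>
        ((PySem.List.enumerate rl.2.toList 0).filter (fun p => p.2 == '#')).map
          (F rl)) = [] := by
  intro ls r h
  rw [List.flatMap_eq_nil_iff]
  intro rl hrl
  rw [PySem.List.mem_enumerate_iff] at hrl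
  obtain ⟨i, hi, rfl⟩ := hrl
  rw [h _ (List.getElem_mem hi)]
  simp [PySem.List.enumerate_nil]

-- ===== VERDICT (by name: the statement is the Claim_ definition above) =====
set_option maxHeartbeats 2000000 in
theorem parse_galaxies_spec : Claim_equal_parse_galaxies := by
  intro s _ hpre
  obtain ⟨hne, hlen⟩ := hpre
  unfold Spec_parse_galaxies parse_galaxies parse_galaxies_alt
  set lines := PySem.Str.splitlines s with hl
  set w := ((lines.headD "").toList.length) with hw
  set ec : List Bool := (List.range w).map (fun i => pvEmptyCol lines i) with hec
  set g : Nat → Int := fun i => if ec.getD i false then 2 else 1 with hg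
  set wt : String → Int := fun line => if pvAllDotSet line then 2 else 1 with hwt
  set cols : List (List Char) := pvZipCols (lines.map String.toList) with hcols
  set erows : List Nat :=
    ((PySem.List.enumerate lines 0).filter (fun p => pvAllDot p.2.toList)).map
      (fun p => p.1.toNat) with herows
  set ecols : List Nat :=
    ((PySem.List.enumerate cols 0).filter (fun p => pvAllDot p.2)).map
      (fun p => p.1.toNat) with hecols
  have hA := pvOuter_eq g wt lines [] 0
  by_cases hw0 : w = 0
  · -- zero-width grid: every line is empty, both sides are []
    have hempty : ∀ l ∈ lines, l.toList = [] := by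
      intro l hl'
      have := hlen l hl'
      rw [hw0] at this
      exact List.length_eq_zero_iff.mp this
    calc ((lines.foldl
          (fun (st : List (Int × Int) × Int) (line : String) =>
            let y := st.2 + (if pvAllDotSet line then 2 else 1)
            (((PySem.List.enumerate line.toList 0).foldl
                (fun (st2 : List (Int × Int) × Int) (p : Int × Char) =>
                  let x := st2.2 + (if ec.getD p.1.toNat false then 2 else 1)
                  ((if p.2 == '#' then st2.1 ++ [(x, y)] else st2.1), x))
                (st.1, 0)).1, y))
          ([], 0)).1 : List (Int × Int))
        = [] ++ pvFlat g wt lines 0 := hA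
      _ = [] := by rw [pvFlat_empty g wt lines 0 hempty]; rfl
      _ = _ := by
          rw [pvFlatMap_empty
            (F := fun rl p =>
              (((p.1.toNat : Int) + 1 +
                 (2 - 1) * ((ecols.filter (fun j => j ≤ p.1.toNat)).length : Int),
               (rl.1.toNat : Int) + 1 +
                 (2 - 1) * ((erows.filter (fun j => j ≤ rl.1.toNat)).length : Int))))
            lines 0 hempty]
  · -- positive width: every line is nonempty
    have hlw : ∀ l ∈ lines, l.toList.length = w := fun l hl' => hlen l hl'
    have hnonempty : ∀ l ∈ lines, l.toList ≠ [] := by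
      intro l hl' hnil
      apply hw0
      rw [← hlw l hl', hnil]
      rfl
    -- the Y table: row coordinate = r+1 + number of empty rows at or before r
    have hY : ∀ j, j < lines.length →
        ((0 + j : Nat) : Int) + 1 +
            (2 - 1) * ((erows.filter (fun m => m ≤ 0 + j)).length : Int)
          = pvEnd wt (lines.take (j + 1)) 0 := by
      intro j hj
      have hcount := pvIdx_count (fun l : String => pvAllDot l.toList) lines 0 j
      simp only [Nat.cast_zero] at hcount
      have hcongr : (lines.take (j + 1)).countP (fun l => pvAllDot l.toList)
          = (lines.take (j + 1)).countP pvAllDotSet := by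
        apply List.countP_congr
        intro l hl'
        have hm : l ∈ lines := List.mem_of_mem_take hl'
        rw [pvAllDotSet_eq l (hnonempty l hm)]
      rw [hwt, pvEnd_if pvAllDotSet (lines.take (j + 1)) 0, ← hcongr,
        List.length_take, herows]
      rw [hcount]
      have : min (j + 1) lines.length = j + 1 := by omega
      rw [this]
      push_cast
      omega
    -- the X table: column coordinate = i+1 + number of empty columns at or before i
    have hX : ∀ l ∈ lines, ∀ i, i < l.toList.length →
        ((i : Nat) : Int) + 1 +
            (2 - 1) * ((ecols.filter (fun j => j ≤ i)).length : Int)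
          = pvCsum g (i + 1) := by
      intro l hl' i hi
      have hiw : i < w := by have := hlw l hl'; omega
      -- the column list, written by columns
      obtain ⟨l0, rest, hcons⟩ := List.exists_cons_of_ne_nil hne
      have hl0w : l0.toList.length = w := by
        rw [hw, hcons]; rfl
      have hzip : cols = (List.range w).map
          (fun j => (lines.map String.toList).map (fun c => (c.drop j).headD ' ')) := by
        rw [hcols, hcons, List.map_cons, pvZipCols, hl0w, ← List.map_cons,
          ← hcons]
        exact pvZipGo_eq w (lines.map String.toList) (by
          intro c hc
          obtain ⟨l', hl'', rfl⟩ := List.mem_map.mp hc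
          rw [hlw l' hl''])
      -- per-column: the zipped column is all dots iff A's column test holds
      have hcol : ∀ j, j < w →
          pvAllDot ((lines.map String.toList).map (fun c => (c.drop j).headD ' '))
            = pvEmptyCol lines j := by
        intro j hjw
        have hpt : ∀ line ∈ lines,
            (((line.toList.drop j).headD ' ') == '.')
              = (PySem.Str.pyGet? line (j : Int) == some '.') := by
          intro line hline
          have hjlen : j < line.toList.length := by have := hlw line hline; omega
          have hdrop : (line.toList.drop j).headD ' ' = line.toList[j] := by
            rw [List.headD_eq_head?_getD, List.head?_drop, List.getElem?_eq_getElem hjlen]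
            rfl
          have hs : j < line.length := by
            have := hjlen
            rw [String.length_toList] at this
            exact this
          have hget : PySem.Str.pyGet? line (j : Int) = some line.toList[j] := by
            simp [PySem.Str.pyGet?_eq, PySem.List.pyGet?, PySem.List.pyIdx?, hs]
            rfl
          rw [hdrop, hget]
          simp
          rfl
        unfold pvAllDot pvEmptyCol
        rw [Bool.eq_iff_iff, List.all_eq_true, List.all_eq_true]
        constructor
        · intro hall line hline
          show (PySem.Str.pyGet? line (j : Int) == some '.') = true
          rw [← hpt line hline]
          exact hall ((line.toList.drop j).headD ' ')
            (List.mem_map.mpr ⟨line.toList, List.mem_map.mpr ⟨line, hline, rfl⟩, rfl⟩)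
        · intro hall c hc
          obtain ⟨cs, hcs, rfl⟩ := List.mem_map.mp hc
          obtain ⟨line, hline, rfl⟩ := List.mem_map.mp hcs
          show (((line.toList.drop j).headD ' ') == '.') = true
          rw [hpt line hline]
          exact hall line hline
      -- B's count equals the count of A's empty columns among the first i+1
      have hcount := pvIdx_count pvAllDot cols 0 i
      simp only [Nat.cast_zero] at hcount
      have htake : cols.take (i + 1) = (List.range (i + 1)).map
          (fun j => (lines.map String.toList).map (fun c => (c.drop j).headD ' ')) := by
        rw [hzip, ← List.map_take, List.take_range, Nat.min_eq_left (by omega)]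
      have hc2 : (cols.take (i + 1)).countP pvAllDot
          = ((List.range (i + 1)).countP (fun j => pvEmptyCol lines j)) := by
        rw [htake, List.countP_map]
        apply List.countP_congr
        intro j hj
        have hji : j < i + 1 := List.mem_range.mp hj
        simp only [Function.comp_apply]
        rw [hcol j (by omega)]
      -- A's cumulative coordinate in counting form
      have hgA : pvCsum g (i + 1)
          = 0 + ((i + 1 : Nat) : Int) +
              (((List.range (i + 1)).countP (fun n => ec.getD n false)) : Int) := by
        rw [pvCsum, hg, pvEnd_if (fun n => ec.getD n false) (List.range (i + 1)) 0]
        simp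
      have hc3 : (List.range (i + 1)).countP (fun n => ec.getD n false)
          = (List.range (i + 1)).countP (fun n => pvEmptyCol lines n) := by
        apply List.countP_congr
        intro n hn
        have hni : n < i + 1 := List.mem_range.mp hn
        have hnw : n < w := by omega
        rw [hec]
        simp [List.getD_eq_getElem?_getD, List.getElem?_map, List.getElem?_range hnw]
      rw [hgA, hc3, hecols, ← hc2, ← hcount]
      push_cast
      ring_nf
    have hB := pvB_eq g wt
        (fun n => ((n : Nat) : Int) + 1 +
          (2 - 1) * ((ecols.filter (fun j => j ≤ n)).length : Int))
        (fun n => ((n : Nat) : Int) + 1 +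
          (2 - 1) * ((erows.filter (fun m => m ≤ n)).length : Int))
        lines 0 0 hY hX
    calc ((lines.foldl
          (fun (st : List (Int × Int) × Int) (line : String) =>
            let y := st.2 + (if pvAllDotSet line then 2 else 1)
            (((PySem.List.enumerate line.toList 0).foldl
                (fun (st2 : List (Int × Int) × Int) (p : Int × Char) =>
                  let x := st2.2 + (if ec.getD p.1.toNat false then 2 else 1)
                  ((if p.2 == '#' then st2.1 ++ [(x, y)] else st2.1), x))
                (st.1, 0)).1, y))
          ([], 0)).1 : List (Int × Int))
        = [] ++ pvFlat g wt lines 0 := hA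
      _ = pvFlat g wt lines 0 := by simp
      _ = _ := by
          show pvFlat g wt lines 0 =
            (PySem.List.enumerate lines 0).flatMap (fun rl =>
              ((PySem.List.enumerate rl.2.toList 0).filter (fun p => p.2 == '#')).map
                (fun p =>
                  ((p.1.toNat : Int) + 1 +
                     (2 - 1) * ((ecols.filter (fun j => j ≤ p.1.toNat)).length : Int),
                   (rl.1.toNat : Int) + 1 +
                     (2 - 1) * ((erows.filter (fun m => m ≤ rl.1.toNat)).length : Int))))
          rw [show (PySem.List.enumerate lines 0 : List (Int × String))
              = PySem.List.enumerate lines (((0 : Nat) : Int)) from by norm_num]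
          exact hB.symm
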